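-- pv_equiv track=rewrite | github.com/DEC4F/Leetcode-Sol | 1395. Count Number of Teams/NumTeams.py | numTeams_BF
-- ===== SOURCE A (Python) =====
-- from typing import List
--
-- def numTeams_BF(rating: List[int]) -> int:
--     """
--     T(n) = O(n^3)
--     S(n) = O(1)
--     """
--     if len(rating) < 3:
--         return 0
--     res = 0
--     for i, r1 in enumerate(rating):
--         for j, r2 in enumerate(rating[i + 1:]):
--             for k, r3 in enumerate(rating[i + j + 1:]):
--                 if r1 < r2 < r3 or r1 > r2 > r3:
--                     res += 1
--     return res
-- ===== SOURCE B (Python) =====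
-- from typing import List
--
-- def numTeams_BF(rating: List[int]) -> int:
--     """
--     For each middle index j, count smaller/larger elements on each side
--     and combine: O(n^2) time, O(1) extra space.
--     """
--     n = len(rating)
--     res = 0
--     for j in range(1, n - 1):
--         rj = rating[j]
--         ll = lg = rl = rg = 0
--         for x in rating[:j]:
--             if x < rj:
--                 ll += 1
--             elif x > rj:
--                 lg += 1
--         for x in rating[j + 1:]:
--             if x < rj:
--                 rl += 1
--             elif x > rj:
--                 rg += 1
--         res += ll * rg + lg * rl
--     return res
-- ===== Notes on version B (the rewrite author's own statement) =====
-- stated objective: faster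
-- what changed: Replaces the triple nested scan over all index triples by a single pass over middle indices, counting smaller/larger elements on each side and combining the counts multiplicatively.
import Mathlib
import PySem

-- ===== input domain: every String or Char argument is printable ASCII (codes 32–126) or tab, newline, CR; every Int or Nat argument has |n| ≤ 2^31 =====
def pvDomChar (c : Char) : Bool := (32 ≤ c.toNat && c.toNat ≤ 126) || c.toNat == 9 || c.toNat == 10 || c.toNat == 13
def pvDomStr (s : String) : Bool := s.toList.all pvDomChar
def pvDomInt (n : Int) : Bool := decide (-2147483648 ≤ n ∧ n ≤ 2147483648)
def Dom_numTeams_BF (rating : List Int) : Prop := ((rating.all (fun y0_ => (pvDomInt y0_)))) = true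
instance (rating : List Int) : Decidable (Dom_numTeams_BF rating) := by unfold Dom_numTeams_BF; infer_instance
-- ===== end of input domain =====

-- B replaces A's cubic scan over all index triples by a quadratic pass that, for each
-- middle index, counts smaller/larger elements on each side and combines the counts.

-- ===== PORT A =====
def numTeams_BF (rating : List Int) : Int :=
  if PySem.List.len rating < 3 then 0
  else
    (PySem.List.enumerate rating 0).foldl (fun res p =>
      (PySem.List.enumerate (PySem.List.slice rating (some (p.1 + 1)) none) 0).foldl (fun res q =>
        (PySem.List.enumerate (PySem.List.slice rating (some (p.1 + q.1 + 1)) none) 0).foldl (fun res t =>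
          if (p.2 < q.2 ∧ q.2 < t.2) ∨ (p.2 > q.2 ∧ q.2 > t.2) then res + 1 else res) res) res) 0

-- ===== PORT B =====
def numTeams_BF_alt (rating : List Int) : Int :=
  let n := PySem.List.len rating
  (PySem.List.pyRange 1 (n - 1) 1).foldl (fun res j =>
    let rj := PySem.List.pyGetD rating j 0
    let lc := (PySem.List.slice rating none (some j)).foldl
      (fun (c : Int × Int) x => if x < rj then (c.1 + 1, c.2) else if x > rj then (c.1, c.2 + 1) else c) (0, 0)
    let rc := (PySem.List.slice rating (some (j + 1)) none).foldl
      (fun (c : Int × Int) x => if x < rj then (c.1 + 1, c.2) else if x > rj then (c.1, c.2 + 1) else c) (0, 0)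
    res + (lc.1 * rc.2 + lc.2 * rc.1)) 0

-- ===== PRECONDITION & SPEC =====
def Spec_numTeams_BF (rating : List Int) (out : Int) : Prop := out = numTeams_BF_alt rating
instance (rating : List Int) (out : Int) : Decidable (Spec_numTeams_BF rating out) := by unfold Spec_numTeams_BF; infer_instance

-- ===== CLAIM (what is proved, stated in full; the proofs are below) =====
def Claim_equal_numTeams_BF : Prop := ∀ (rating : List Int), Dom_numTeams_BF rating → Spec_numTeams_BF rating (numTeams_BF rating)

-- ===== LEMMAS AND PROOFS =====

-- value at index i (indices are always in range where these are used; 0 is a dummy default)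
def pvG (r : List Int) (i : ℕ) : Int := r.getD i 0
-- the four side counts around a middle index j
def pvCL (r : List Int) (j : ℕ) : Int := ((r.take j).countP (fun x => x < pvG r j) : Int)
def pvCG (r : List Int) (j : ℕ) : Int := ((r.take j).countP (fun x => pvG r j < x) : Int)
def pvDL (r : List Int) (j : ℕ) : Int := ((r.drop (j + 1)).countP (fun x => x < pvG r j) : Int)
def pvDG (r : List Int) (j : ℕ) : Int := ((r.drop (j + 1)).countP (fun x => pvG r j < x) : Int)
def pvB (r : List Int) (j : ℕ) : Int := pvCL r j * pvDG r j + pvCG r j * pvDL r j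
-- the common value both ports are proved equal to
def pvT (r : List Int) : Int := ∑ j ∈ Finset.range r.length, pvB r j
-- A's triple loop as a triple indexed sum (b, t are offsets into the slices)
def pvS3 (r : List Int) : ℤ :=
  ∑ a ∈ Finset.range r.length, ∑ b ∈ Finset.range (r.length - (a + 1)),
    ∑ t ∈ Finset.range (r.length - (a + b + 1)),
      (if (pvG r a < pvG r (a + 1 + b) ∧ pvG r (a + 1 + b) < pvG r (a + b + 1 + t))
          ∨ (pvG r a > pvG r (a + 1 + b) ∧ pvG r (a + 1 + b) > pvG r (a + b + 1 + t))
        then (1 : ℤ) else 0)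

theorem pv_foldl_ite_count {α : Type} (c : α → Prop) [DecidablePred c] (l : List α) (a : ℤ) :
    l.foldl (fun acc x => if c x then acc + 1 else acc) a
      = a + (l.map (fun x => if c x then (1 : ℤ) else 0)).sum := by
  induction l generalizing a with
  | nil => simp
  | cons x xs ih => simp only [List.foldl_cons, List.map_cons, List.sum_cons, ih]; split <;> ring

theorem pv_foldl_count (c : Int → Prop) [DecidablePred c] (l : List Int) (a : Int) :
    l.foldl (fun a x => if c x then a + 1 else a) a = a + (l.countP (fun x => decide (c x)) : Int) := by
  induction l generalizing a with
  | nil => simp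
  | cons x xs ih =>
    simp only [List.foldl_cons, List.countP_cons, ih]
    by_cases h : c x <;> simp [h] <;> push_cast <;> ring

theorem pv_foldl_pair (rj : Int) (l : List Int) :
    l.foldl (fun (c : Int × Int) x =>
        if x < rj then (c.1 + 1, c.2) else if x > rj then (c.1, c.2 + 1) else c) (0, 0)
      = ((l.countP (fun x => x < rj) : Int), (l.countP (fun x => rj < x) : Int)) := by
  have h : (fun (c : Int × Int) x =>
      if x < rj then (c.1 + 1, c.2) else if x > rj then (c.1, c.2 + 1) else c)
      = fun (c : Int × Int) x =>
        ((fun a x => if x < rj then a + 1 else a) c.1 x, (fun a x => if rj < x then a + 1 else a) c.2 x) := by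
    funext c x
    by_cases h1 : x < rj <;> by_cases h2 : rj < x <;> simp [h1, h2] <;> omega
  rw [h, PySem.List.foldl_prod_mk (fun a x => if x < rj then a + 1 else a)
    (fun a x => if rj < x then a + 1 else a) l 0 0]
  rw [pv_foldl_count (fun x => x < rj), pv_foldl_count (fun x => rj < x)]
  simp

theorem pv_sum_map_getD (l : List Int) (f : Int → ℤ) :
    (l.map f).sum = ∑ i ∈ Finset.range l.length, f (l.getD i 0) := by
  induction l with
  | nil => simp
  | cons x xs ih => simp [Finset.sum_range_succ', ih, add_comm]

theorem pv_sum_range (m : ℕ) (f : ℕ → ℤ) :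
    ((List.range m).map f).sum = ∑ i ∈ Finset.range m, f i := rfl

theorem pv_sum_map_enum (l : List Int) (S : Int × Int → ℤ) :
    ((PySem.List.enumerate l 0).map S).sum
      = ∑ b ∈ Finset.range l.length, S (((b : ℕ) : Int), l.getD b 0) := by
  rw [PySem.List.enumerate_eq_map_pyRange l 0, List.map_map, PySem.List.pyRange_one, List.map_map]
  have : ((PySem.List.len l - 0).toNat) = l.length := by simp [PySem.List.len_eq]
  rw [this]
  show ∑ b ∈ Finset.range l.length, S ((0 : Int) + b, PySem.List.pyGetD l ((0 : Int) + b) 0) = _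
  refine Finset.sum_congr rfl fun b _ => ?_
  simp

theorem pv_getD_drop (r : List Int) (m i : ℕ) : (r.drop m).getD i 0 = r.getD (m + i) 0 := by
  simp [List.getD_eq_getElem?_getD, List.getElem?_drop]

theorem pv_countP_drop (r : List Int) (m : ℕ) (c : Int → Prop) [DecidablePred c] :
    (((r.drop m).countP (fun x => decide (c x)) : ℕ) : ℤ)
      = ∑ k ∈ Finset.Ico m r.length, (if c (pvG r k) then (1 : ℤ) else 0) := by
  rw [← PySem.List.sum_map_ite_one_zero, Finset.sum_Ico_eq_sum_range]
  have h : (fun x => if (fun x => decide (c x)) x = true then (1 : ℤ) else 0)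
      = fun x => if c x then (1 : ℤ) else 0 := by funext x; simp
  rw [h, pv_sum_map_getD, List.length_drop]
  refine Finset.sum_congr rfl fun k _ => ?_
  simp [pvG, List.getD_eq_getElem?_getD, List.getElem?_drop]

theorem pv_countP_take (r : List Int) (j : ℕ) (hj : j ≤ r.length) (c : Int → Prop) [DecidablePred c] :
    (((r.take j).countP (fun x => decide (c x)) : ℕ) : ℤ)
      = ∑ i ∈ Finset.range j, (if c (pvG r i) then (1 : ℤ) else 0) := by
  rw [← PySem.List.sum_map_ite_one_zero]
  have h : (fun x => if (fun x => decide (c x)) x = true then (1 : ℤ) else 0)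
      = fun x => if c x then (1 : ℤ) else 0 := by funext x; simp
  rw [h, pv_sum_map_getD, List.length_take, min_eq_left hj]
  refine Finset.sum_congr rfl fun i hi => ?_
  simp at hi
  simp [pvG, List.getD_eq_getElem?_getD, hi]

theorem pv_swap_tri (n : ℕ) (f : ℕ → ℕ → ℤ) :
    ∑ i ∈ Finset.range n, ∑ j ∈ Finset.Ico (i + 1) n, f i j
      = ∑ j ∈ Finset.range n, ∑ i ∈ Finset.range j, f i j := by
  have h1 : ∀ i, ∑ j ∈ Finset.Ico (i + 1) n, f i j
      = ∑ j ∈ Finset.range n, if i < j then f i j else 0 := by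
    intro i
    rw [show Finset.Ico (i + 1) n = (Finset.range n).filter (fun j => i < j) from by
      ext x; simp [Finset.mem_filter]; omega, Finset.sum_filter]
  have h2 : ∀ j ∈ Finset.range n, (∑ i ∈ Finset.range j, f i j
      = ∑ i ∈ Finset.range n, if i < j then f i j else 0) := by
    intro j hj
    rw [show Finset.range j = (Finset.range n).filter (fun i => i < j) from by
      ext x; simp at hj ⊢; omega, Finset.sum_filter]
  simp only [h1]
  rw [Finset.sum_congr rfl h2, Finset.sum_comm]

theorem pv_B_zero (r : List Int) : pvB r 0 = 0 := by
  simp [pvB, pvCL, pvCG]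

theorem pv_B_last (r : List Int) (j : ℕ) (h : r.length ≤ j + 1) : pvB r j = 0 := by
  simp [pvB, pvDL, pvDG, List.drop_eq_nil_of_le h]

theorem pv_T_shift (r : List Int) :
    pvT r = ∑ k ∈ Finset.range (r.length - 2), pvB r (1 + k) := by
  unfold pvT
  match hn : r.length with
  | 0 => simp
  | 1 => simp [pv_B_zero]
  | (m + 2) =>
    rw [Finset.sum_range_succ, pv_B_last r (m + 1) (by omega), add_zero,
      Finset.sum_range_succ', pv_B_zero, add_zero]
    have h : m + 2 - 2 = m := by omega
    rw [h]
    exact Finset.sum_congr rfl fun k _ => by rw [Nat.add_comm]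

theorem pv_T_small (r : List Int) (h : r.length < 3) : pvT r = 0 := by
  rw [pv_T_shift]
  have : r.length - 2 = 0 := by omega
  rw [this]
  simp

theorem pv_A_sum (r : List Int) (h : ¬ PySem.List.len r < 3) : numTeams_BF r = pvS3 r := by
  rw [numTeams_BF, if_neg h]
  simp only [pv_foldl_ite_count, PySem.List.foldl_add, pv_sum_map_enum, zero_add]
  unfold pvS3
  refine Finset.sum_congr rfl fun a _ => ?_
  have h1 : ((a : ℕ) : ℤ) + 1 = ((a + 1 : ℕ) : ℤ) := by push_cast; ring
  simp only [h1, PySem.List.slice_from_natCast, List.length_drop]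
  refine Finset.sum_congr rfl fun b _ => ?_
  have h2 : ((a : ℕ) : ℤ) + ((b : ℕ) : ℤ) + 1 = ((a + b + 1 : ℕ) : ℤ) := by push_cast; ring
  simp only [h2, PySem.List.slice_from_natCast, List.length_drop, pv_getD_drop]
  refine Finset.sum_congr rfl fun t _ => ?_
  simp only [pvG]
  rfl

theorem pv_S3_eq_T (r : List Int) : pvS3 r = pvT r := by
  classical
  set n := r.length with hn
  have step1 : pvS3 r = ∑ a ∈ Finset.range n, ∑ j ∈ Finset.Ico (a + 1) n,
      ∑ k ∈ Finset.Ico (j + 1) n,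
        (if (pvG r a < pvG r j ∧ pvG r j < pvG r k)
            ∨ (pvG r j < pvG r a ∧ pvG r k < pvG r j) then (1 : ℤ) else 0) := by
    unfold pvS3
    refine Finset.sum_congr rfl fun a _ => ?_
    rw [Finset.sum_Ico_eq_sum_range]
    refine Finset.sum_congr rfl fun b hb => ?_
    simp only [Finset.mem_range] at hb
    rw [Finset.sum_Ico_eq_sum_range]
    have hsz : n - (a + b + 1) = (n - (a + b + 2)) + 1 := by omega
    rw [hsz, Finset.sum_range_succ']
    have hz0 : a + b + 1 + 0 = a + 1 + b := by omega
    rw [hz0]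
    simp only [lt_irrefl, and_false, gt_iff_lt, or_self, if_false, add_zero]
    have hsz2 : n - (a + b + 2) = n - (a + 1 + b + 1) := by omega
    rw [hsz2]
    refine Finset.sum_congr rfl fun t _ => ?_
    have e1 : a + 1 + b + (t + 1) = a + 1 + b + 1 + t := by omega
    rw [e1]
  have hsplit : ∀ j a k : ℕ,
      (if (pvG r a < pvG r j ∧ pvG r j < pvG r k) ∨ (pvG r j < pvG r a ∧ pvG r k < pvG r j)
        then (1 : ℤ) else 0)
      = (if pvG r a < pvG r j then (1 : ℤ) else 0) * (if pvG r j < pvG r k then (1 : ℤ) else 0)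
        + (if pvG r j < pvG r a then (1 : ℤ) else 0) * (if pvG r k < pvG r j then (1 : ℤ) else 0) := by
    intro j a k
    split_ifs <;> simp_all <;> omega
  have step3 : ∀ j, j < n → (∑ a ∈ Finset.range j, ∑ k ∈ Finset.Ico (j + 1) n,
      (if (pvG r a < pvG r j ∧ pvG r j < pvG r k)
          ∨ (pvG r j < pvG r a ∧ pvG r k < pvG r j) then (1 : ℤ) else 0)) = pvB r j := by
    intro j hj
    simp only [hsplit, Finset.sum_add_distrib, ← Finset.mul_sum]
    rw [← Finset.sum_mul, ← Finset.sum_mul]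
    rw [pvB]
    have hCL : pvCL r j = ∑ a ∈ Finset.range j, (if pvG r a < pvG r j then (1 : ℤ) else 0) := by
      rw [pvCL]
      exact pv_countP_take r j (le_of_lt hj) (fun x => x < pvG r j)
    have hCG : pvCG r j = ∑ a ∈ Finset.range j, (if pvG r j < pvG r a then (1 : ℤ) else 0) := by
      rw [pvCG]
      exact pv_countP_take r j (le_of_lt hj) (fun x => pvG r j < x)
    have hDG : pvDG r j = ∑ k ∈ Finset.Ico (j + 1) n, (if pvG r j < pvG r k then (1 : ℤ) else 0) := by
      rw [pvDG]
      exact pv_countP_drop r (j + 1) (fun x => pvG r j < x)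
    have hDL : pvDL r j = ∑ k ∈ Finset.Ico (j + 1) n, (if pvG r k < pvG r j then (1 : ℤ) else 0) := by
      rw [pvDL]
      exact pv_countP_drop r (j + 1) (fun x => x < pvG r j)
    rw [hCL, hCG, hDG, hDL]
  rw [step1, pv_swap_tri]
  unfold pvT
  exact Finset.sum_congr rfl fun j hj => step3 j (Finset.mem_range.mp hj)

theorem pv_A_eq (r : List Int) : numTeams_BF r = pvT r := by
  by_cases h : PySem.List.len r < 3
  · rw [numTeams_BF, if_pos h, pv_T_small r (by simp [PySem.List.len_eq] at h; exact_mod_cast h)]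
  · rw [pv_A_sum r h, pv_S3_eq_T]

theorem pv_B_eq (r : List Int) : numTeams_BF_alt r = pvT r := by
  conv_lhs => simp only [numTeams_BF_alt]
  rw [PySem.List.foldl_add, PySem.List.pyRange_one, List.map_map]
  have hm : ((PySem.List.len r - 1 - 1).toNat) = r.length - 2 := by
    simp [PySem.List.len_eq]; omega
  rw [hm, pv_sum_range, zero_add, pv_T_shift]
  refine Finset.sum_congr rfl fun k _ => ?_
  simp only [Function.comp_apply]
  have h1 : (1 : ℤ) + (k : ℕ) = ((1 + k : ℕ) : ℤ) := by push_cast; ring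
  simp only [h1]
  have h2 : ((1 + k : ℕ) : ℤ) + 1 = ((k + 2 : ℕ) : ℤ) := by push_cast; ring
  simp only [h2]
  simp only [PySem.List.pyGetD_natCast, PySem.List.slice_to_natCast, PySem.List.slice_from_natCast]
  rw [pv_foldl_pair, pv_foldl_pair]
  have h3 : 1 + k + 1 = k + 2 := by omega
  simp [pvB, pvCL, pvCG, pvDL, pvDG, pvG, h3]

-- ===== VERDICT (by name: the statement is the Claim_ definition above) =====
theorem numTeams_BF_spec : Claim_equal_numTeams_BF := by
  intro rating _
  unfold Spec_numTeams_BF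
  rw [pv_A_eq, pv_B_eq]
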